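-- pv_equiv track=rewrite | github.com/jyotirmoydas5392/SPOTLIGHT_PULSAR_SEARCH_SCRIPT | SPOTLIGHT_PULSELINE/scripts/beam_level_candidate_sifting.py | count_consecutive_unique_beams
-- ===== SOURCE A (Python) =====
-- def count_consecutive_unique_beams(consequtive_beam_ids, unique_beam_ids):
--     """
--     Counts how many beam IDs from `Unique_beam_ids` appear consecutively from
--     the start in `consequtive_beam_ids`.
--
--     :param consequtive_beam_ids: NumPy array of beam IDs in sorted order.
--     :param unique_beam_ids: NumPy array of unique beam IDs.
--     :return: Integer count of consecutive matching elements from the start.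
--     """
--     count = 0
--     unique_beam_set = set(unique_beam_ids)  # Convert to set for faster lookup
--
--     for beam_id in consequtive_beam_ids:
--         if beam_id in unique_beam_set:
--             count += 1
--         else:
--             break  # Stop as soon as we find a non-matching beam
--
--     return count
-- ===== SOURCE B (Python) =====
-- def count_consecutive_unique_beams(consequtive_beam_ids, unique_beam_ids):
--     members = set(unique_beam_ids)
--     mask = [1 if beam_id in members else 0 for beam_id in consequtive_beam_ids]
--     total, run = 0, 1
--     for m in mask:
--         run *= m
--         total += run
--     return total
-- ===== Notes on version B (the rewrite author's own statement) =====
-- stated objective: alternative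
-- what changed: Replaces the scan-with-early-break by a full 0/1 membership mask followed by a cumulative-product fold: the running product collapses to 0 at the first non-member, so summing it counts the leading run.
import Mathlib
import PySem

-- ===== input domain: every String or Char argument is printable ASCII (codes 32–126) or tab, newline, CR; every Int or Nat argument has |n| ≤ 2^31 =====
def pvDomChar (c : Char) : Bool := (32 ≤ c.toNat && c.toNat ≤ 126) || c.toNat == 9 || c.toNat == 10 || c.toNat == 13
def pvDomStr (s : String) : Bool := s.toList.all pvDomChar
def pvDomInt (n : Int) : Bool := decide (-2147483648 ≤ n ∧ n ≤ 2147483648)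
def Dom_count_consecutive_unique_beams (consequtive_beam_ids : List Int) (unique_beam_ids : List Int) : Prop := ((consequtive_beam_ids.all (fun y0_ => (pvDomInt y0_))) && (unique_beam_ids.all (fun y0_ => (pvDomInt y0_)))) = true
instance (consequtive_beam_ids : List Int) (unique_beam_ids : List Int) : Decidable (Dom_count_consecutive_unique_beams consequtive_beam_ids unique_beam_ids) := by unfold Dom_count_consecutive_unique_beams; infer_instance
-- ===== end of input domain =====

-- B replaces A's scan-with-early-break by a membership mask plus a cumulative-product fold (alternative decomposition, same cost).


-- ===== PORT A =====
-- loop with early break: structural recursion over the list, accumulator = count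
def pvLoopA (uniqueSet : PySem.Set Int) : List Int → Int → Int
  | [], count => count
  | beam_id :: rest, count =>
      if beam_id ∈ uniqueSet then pvLoopA uniqueSet rest (count + 1) else count

def count_consecutive_unique_beams (consequtive_beam_ids : List Int) (unique_beam_ids : List Int) : Int :=
  pvLoopA (PySem.Set.ofList unique_beam_ids) consequtive_beam_ids 0

-- ===== PORT B =====
-- B: build a 0/1 membership mask, then fold a (total, run) pair; run *= m, total += run
def pvFoldB : List Int → Int × Int → Int × Int
  | [], st => st
  | m :: ms, (total, run) => pvFoldB ms (total + run * m, run * m)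

def count_consecutive_unique_beams_alt (consequtive_beam_ids : List Int) (unique_beam_ids : List Int) : Int :=
  let members := PySem.Set.ofList unique_beam_ids
  let mask := consequtive_beam_ids.map (fun beam_id => if beam_id ∈ members then (1 : Int) else 0)
  (pvFoldB mask (0, 1)).1

-- ===== PRECONDITION & SPEC =====
def Spec_count_consecutive_unique_beams (consequtive_beam_ids : List Int) (unique_beam_ids : List Int) (out : Int) : Prop := out = count_consecutive_unique_beams_alt consequtive_beam_ids unique_beam_ids
instance (consequtive_beam_ids : List Int) (unique_beam_ids : List Int) (out : Int) : Decidable (Spec_count_consecutive_unique_beams consequtive_beam_ids unique_beam_ids out) := by unfold Spec_count_consecutive_unique_beams; infer_instance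

-- ===== CLAIM (what is proved, stated in full; the proofs are below) =====
def Claim_equal_count_consecutive_unique_beams : Prop := ∀ (consequtive_beam_ids : List Int) (unique_beam_ids : List Int), Dom_count_consecutive_unique_beams consequtive_beam_ids unique_beam_ids → Spec_count_consecutive_unique_beams consequtive_beam_ids unique_beam_ids (count_consecutive_unique_beams consequtive_beam_ids unique_beam_ids)

-- ===== LEMMAS AND PROOFS =====

-- ===== VERDICT (by name: the statement is the Claim_ definition above) =====
-- once the run has hit 0, the fold adds nothing to the total
lemma pvFoldB_dead (s : PySem.Set Int) (xs : List Int) (t : Int) :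
    (pvFoldB (xs.map (fun x => if x ∈ s then (1 : Int) else 0)) (t, 0)).1 = t := by
  induction xs generalizing t with
  | nil => rfl
  | cons x xs ih =>
      simp only [List.map, pvFoldB]
      split_ifs <;> simpa using ih t

lemma pvLoopA_eq_foldB (s : PySem.Set Int) (xs : List Int) (c : Int) :
    pvLoopA s xs c = (pvFoldB (xs.map (fun x => if x ∈ s then (1 : Int) else 0)) (c, 1)).1 := by
  induction xs generalizing c with
  | nil => rfl
  | cons x xs ih =>
      simp only [List.map, pvFoldB, pvLoopA]
      split_ifs with h
      · simpa using ih (c + 1)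
      · simpa using (pvFoldB_dead s xs c).symm

theorem count_consecutive_unique_beams_spec : Claim_equal_count_consecutive_unique_beams := by
  intro xs ys _
  unfold Spec_count_consecutive_unique_beams count_consecutive_unique_beams count_consecutive_unique_beams_alt
  exact pvLoopA_eq_foldB _ xs 0
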